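-- pv_equiv track=rewrite | github.com/ZckFreedom/Mathworks | db_sqence/P-CCR_dB.py | shift_order_for_1
-- ===== SOURCE A (Python) =====
-- def find_nk(s_sequence):
-- 	size = len(s_sequence)
-- 	state = s_sequence[:size-1]
-- 	state += state
-- 	states = []
--
-- 	for i in range(0, size - 1):
-- 		if state[i: i + size] not in states:
-- 			states.append(state[i: i + size])
--
-- 	states.sort()
-- 	return states[0]
--
-- class Shift_order_space:
-- 	def __init__(self):
-- 		self._shiftlist = []
-- 		self._shiftnumber = 0
--
-- 	def get_number(self):
-- 		return self._shiftlist[-1][1]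
--
-- 	def len(self):
-- 		return len(self._shiftlist)
--
-- 	def append(self, a_list):
-- 		self._shiftlist.append((a_list, self._shiftnumber))
-- 		self._shiftnumber += 1
--
-- 	def if_not_in(self, a_list):
-- 		if len(self._shiftlist) == 0:
-- 			return True
-- 		for i in range(0, len(self._shiftlist)):
-- 			if self._shiftlist[i][0] == a_list:
-- 				return False
-- 		return True
--
-- 	def find_sequence(self, a_list):
-- 		for i in range(0, len(self._shiftlist)):
-- 			if a_list == self._shiftlist[i][0]:
-- 				return self._shiftlist[i][1]
--
-- 	def select_sort(self):
-- 		resort = self._shiftlist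
-- 		for i in range(0, len(resort) - 1):
-- 			k = i
-- 			for j in range(i, len(resort)):
-- 				if resort[k][0] < resort[j][0]:
-- 					k = j
-- 			if i != k:
-- 				resort[i], resort[k] = resort[k], resort[i]
--
-- def shift_order_for_1(s_sequence):
-- 	size = len(s_sequence) - 1
-- 	necklace = find_nk(s_sequence)
-- 	necklace = necklace[:size]
-- 	necklace += necklace
--
-- 	states = Shift_order_space()
-- 	for i in range(size-1, -1, -1):
-- 		if states.if_not_in(necklace[i:i + size + 1]) and necklace[i] == 1:
-- 			states.append(necklace[i:i + size + 1])
--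
-- 	return states.find_sequence(s_sequence), states.len()
-- ===== SOURCE B (Python) =====
-- def shift_order_for_1(s_sequence):
--     size = len(s_sequence) - 1
--     t = s_sequence[:size]
--     # least rotation of the cyclic word t (running best, no materialized rotation list)
--     best = t
--     for i in range(1, size):
--         c = t[i:] + t[:i]
--         if c < best:
--             best = c
--     necklace = best
--     # minimal cyclic period of the necklace: windows repeat exactly with period p,
--     # so the distinct 1-starting windows are those of the last period -- no dedup needed
--     p = size
--     for d in range(1, size):
--         if necklace[d:] + necklace[:d] == necklace:
--             p = d
--             break
--     result = None
--     count = 0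
--     for i in range(size - 1, size - p - 1, -1):
--         if necklace[i] == 1:
--             w = necklace[i:] + necklace[:i]
--             if w + w[:1] == s_sequence:
--                 result = count
--             count += 1
--     return result, count
-- ===== Notes on version B (the rewrite author's own statement) =====
-- stated objective: alternative
-- what changed: B computes the least rotation as a direct min over rotations (instead of A's dedup-by-linear-scan window list plus full sort) and then eliminates A's dedup machinery entirely: it computes the minimal cyclic period p of the necklace and scans only the last period, since windows of the doubled necklace coincide exactly when their start indices agree modulo p, so the distinct 1-starting windows A collects are precisely those of the last p positions.
-- outside the precondition, e.g. on shift_order_for_1([]): A raises IndexError, B returns (None, 0); on shift_order_for_1([5]): A raises IndexError, B returns (None, 0)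
import Mathlib
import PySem

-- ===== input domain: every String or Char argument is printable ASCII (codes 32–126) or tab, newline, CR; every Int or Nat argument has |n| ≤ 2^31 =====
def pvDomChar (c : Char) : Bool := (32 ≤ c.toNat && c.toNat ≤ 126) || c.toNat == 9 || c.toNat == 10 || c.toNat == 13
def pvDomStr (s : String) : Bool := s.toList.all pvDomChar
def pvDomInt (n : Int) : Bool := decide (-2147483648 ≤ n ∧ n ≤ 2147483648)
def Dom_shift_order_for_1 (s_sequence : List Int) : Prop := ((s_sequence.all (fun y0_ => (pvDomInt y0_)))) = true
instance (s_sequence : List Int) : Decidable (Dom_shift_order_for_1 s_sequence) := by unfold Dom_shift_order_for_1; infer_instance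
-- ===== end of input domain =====

-- B finds the least necklace by a running-best scan over rotations and replaces A's dedup
-- machinery by the minimal cyclic period of the necklace, scanning only the last period.

-- ===== PORT A =====
-- find_nk: distinct windows of the doubled prefix, sorted, smallest (states[0] via pyGetD, in range under Pre_)
def pvFindNk (s_sequence : List Int) : List Int :=
  let size : Int := PySem.List.len s_sequence
  let state : List Int := PySem.List.slice s_sequence none (some (size - 1))
  let state : List Int := state ++ state
  let states : List (List Int) :=
    (PySem.List.pyRange 0 (size - 1) 1).foldl
      (fun states i =>
        if states.contains (PySem.List.slice state (some i) (some (i + size))) then states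
        else states ++ [PySem.List.slice state (some i) (some (i + size))]) []
  let states : List (List Int) := PySem.List.sorted states (fun x => x) false
  PySem.List.pyGetD states 0 []

-- Shift_order_space.if_not_in
def pvIfNotIn (shiftlist : List (List Int × Int)) (a_list : List Int) : Bool :=
  if PySem.List.len shiftlist == 0 then true
  else shiftlist.all (fun p => !(p.1 == a_list))

-- Shift_order_space.find_sequence (None when no entry matches)
def pvFindSequence (shiftlist : List (List Int × Int)) (a_list : List Int) : Option Int :=
  match shiftlist with
  | [] => none
  | p :: rest => if a_list == p.1 then some p.2 else pvFindSequence rest a_list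

def shift_order_for_1 (s_sequence : List Int) : Option Int × Int :=
  let size : Int := PySem.List.len s_sequence - 1
  let necklace : List Int := pvFindNk s_sequence
  let necklace : List Int := PySem.List.slice necklace none (some size)
  let necklace : List Int := necklace ++ necklace
  let states : List (List Int × Int) × Int :=
    (PySem.List.pyRange (size - 1) (-1) (-1)).foldl
      (fun st i =>
        if pvIfNotIn st.1 (PySem.List.slice necklace (some i) (some (i + size + 1)))
            && (PySem.List.pyGetD necklace i 0 == 1) then
          (st.1 ++ [(PySem.List.slice necklace (some i) (some (i + size + 1)), st.2)], st.2 + 1)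
        else st)
      (([] : List (List Int × Int)), (0 : Int))
  (pvFindSequence states.1 s_sequence, PySem.List.len states.1)

-- ===== PORT B =====
def shift_order_for_1_alt (s_sequence : List Int) : Option Int × Int :=
  let size : Int := PySem.List.len s_sequence - 1
  let t : List Int := PySem.List.slice s_sequence none (some size)
  -- least rotation of t by a running best
  let necklace : List Int :=
    (PySem.List.pyRange 1 size 1).foldl
      (fun best i =>
        let c := PySem.List.slice t (some i) none ++ PySem.List.slice t none (some i)
        if c < best then c else best) t
  -- first d in 1..size-1 with rotation by d equal to the necklace (the for/break loop), else size
  let p : Int :=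
    ((PySem.List.pyRange 1 size 1).find?
      (fun d => PySem.List.slice necklace (some d) none ++ PySem.List.slice necklace none (some d)
                  == necklace)).getD size
  let fin : Option Int × Int :=
    (PySem.List.pyRange (size - 1) (size - p - 1) (-1)).foldl
      (fun st i =>
        if PySem.List.pyGetD necklace i 0 == 1 then
          let w := PySem.List.slice necklace (some i) none ++ PySem.List.slice necklace none (some i)
          (if w ++ PySem.List.slice w none (some 1) == s_sequence then some st.2 else st.1, st.2 + 1)
        else st)
      ((none : Option Int), (0 : Int))
  fin

-- ===== PRECONDITION & SPEC =====
-- Pre_ excludes lists of length < 2, on which A raises IndexError (states[0] of an empty list).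
def Pre_shift_order_for_1 (s_sequence : List Int) : Prop := 2 ≤ s_sequence.length
instance (s_sequence : List Int) : Decidable (Pre_shift_order_for_1 s_sequence) := by
  unfold Pre_shift_order_for_1; infer_instance
def pvWitness_shift_order_for_1 : List Int := [1, 0, 1]

def Spec_shift_order_for_1 (s_sequence : List Int) (out : Option Int × Int) : Prop := out = shift_order_for_1_alt s_sequence
instance (s_sequence : List Int) (out : Option Int × Int) : Decidable (Spec_shift_order_for_1 s_sequence out) := by unfold Spec_shift_order_for_1; infer_instance

-- ===== CLAIM (what is proved, stated in full; the proofs are below) =====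
def Claim_equal_shift_order_for_1 : Prop := ∀ (s_sequence : List Int), Dom_shift_order_for_1 s_sequence → Pre_shift_order_for_1 s_sequence → Spec_shift_order_for_1 s_sequence (shift_order_for_1 s_sequence)

-- ===== LEMMAS AND PROOFS =====

-- window shape: rotation followed by the repeat of its first element
def pvF (x : List Int) : List Int := x ++ x.take 1

-- lexicographic order ignores anything appended after a strict difference within equal lengths
lemma pvLexAppend : ∀ (x y u v : List Int), x.length = y.length →
    List.Lex (· < ·) x y → List.Lex (· < ·) (x ++ u) (y ++ v) := by
  intro x y u v hl h
  induction h with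
  | nil => simp at hl
  | rel h => exact List.Lex.rel h
  | @cons a l₁ l₂ h ih =>
      exact List.Lex.cons (ih (by simpa using hl))

lemma pvFMono (x y : List Int) (hl : x.length = y.length) (h : x ≤ y) : pvF x ≤ pvF y := by
  rcases lt_or_eq_of_le h with hlt | rfl
  · exact le_of_lt ((List.lt_iff_lex_lt _ _).mpr
      (pvLexAppend x y (x.take 1) (y.take 1) hl ((List.lt_iff_lex_lt _ _).mp hlt)))
  · exact le_rfl

-- pvF is injective on lists of equal length
lemma pvFInj (x y : List Int) (hl : x.length = y.length) (h : pvF x = pvF y) : x = y := by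
  have hx : (pvF x).take x.length = x := List.take_left' rfl
  have hy : (pvF y).take y.length = y := List.take_left' rfl
  rw [← hx, ← hy, h, hl]

-- pvFindSequence over an append: first match wins
lemma pvFindSequence_append (a b : List (List Int × Int)) (s : List Int) :
    pvFindSequence (a ++ b) s = (pvFindSequence a s).or (pvFindSequence b s) := by
  induction a with
  | nil => simp [pvFindSequence]
  | cons p rest ih =>
      simp only [List.cons_append, pvFindSequence]
      split <;> simp [ih]

lemma pvFindSequence_none (sl : List (List Int × Int)) (s : List Int)
    (h : s ∉ sl.map (·.1)) : pvFindSequence sl s = none := by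
  induction sl with
  | nil => rfl
  | cons p rest ih =>
      simp only [pvFindSequence]
      rw [if_neg, ih]
      · intro hm; exact h (by simp [hm])
      · intro hb; exact h (by simp [eq_of_beq hb])

-- A's membership scan is the complement of membership among stored first components
lemma pvIfNotIn_eq (sl : List (List Int × Int)) (w : List Int) :
    pvIfNotIn sl w = !(PySem.Set.contains (sl.map (·.1)) w) := by
  have hall : ∀ l : List (List Int × Int),
      (l.all fun q => !(q.1 == w)) = !(PySem.Set.contains (l.map (·.1)) w) := by
    intro l
    induction l with
    | nil => rfl
    | cons q r ih =>
        rw [PySem.Set.contains_eq_listContains] at ih ⊢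
        simp only [List.all_cons, List.map_cons, List.contains_cons, Bool.not_or, ih]
        have : (q.1 == w) = (w == q.1) := by rw [Bool.eq_iff_iff, beq_iff_eq, beq_iff_eq]; exact eq_comm
        rw [this]
  cases sl with
  | nil => rfl
  | cons p rest =>
      have h1 : (PySem.List.len (p :: rest) == 0) = false := by
        rw [PySem.List.len_eq]
        simp only [List.length_cons, beq_eq_false_iff_ne, ne_eq]
        omega
      simp only [pvIfNotIn, h1, Bool.false_eq_true, if_false]
      exact hall _

lemma pvSetAdd_not_mem (s : PySem.Set (List Int)) (x : List Int) (h : x ∉ s) :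
    PySem.Set.add s x = s ++ [x] := by
  rw [show PySem.Set.add s x = if List.contains s x then s else s ++ [x] from rfl, if_neg]
  simp [h]

-- the list-of-pairs loop of A and a set-based loop simulate each other
lemma pvLoopSim (d s : List Int) (sz : Int) (is : List Int) :
    ∀ (sl : List (List Int × Int)),
    is.foldl
      (fun st i =>
        if (PySem.List.pyGetD d i 0 == 1)
            && !(PySem.Set.contains st.2.2 (PySem.List.slice d (some i) (some (i + sz + 1)))) then
          (if PySem.List.slice d (some i) (some (i + sz + 1)) == s then some st.2.1 else st.1,
           st.2.1 + 1, PySem.Set.add st.2.2 (PySem.List.slice d (some i) (some (i + sz + 1))))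
        else st)
      ((pvFindSequence sl s : Option Int), ((sl.length : Int)), (sl.map (·.1) : PySem.Set (List Int)))
    =
    (pvFindSequence (is.foldl
      (fun st i =>
        if pvIfNotIn st.1 (PySem.List.slice d (some i) (some (i + sz + 1)))
            && (PySem.List.pyGetD d i 0 == 1) then
          (st.1 ++ [(PySem.List.slice d (some i) (some (i + sz + 1)), st.2)], st.2 + 1)
        else st) (sl, (sl.length : Int))).1 s,
     ((is.foldl
      (fun st i =>
        if pvIfNotIn st.1 (PySem.List.slice d (some i) (some (i + sz + 1)))
            && (PySem.List.pyGetD d i 0 == 1) then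
          (st.1 ++ [(PySem.List.slice d (some i) (some (i + sz + 1)), st.2)], st.2 + 1)
        else st) (sl, (sl.length : Int))).1.length : Int),
     ((is.foldl
      (fun st i =>
        if pvIfNotIn st.1 (PySem.List.slice d (some i) (some (i + sz + 1)))
            && (PySem.List.pyGetD d i 0 == 1) then
          (st.1 ++ [(PySem.List.slice d (some i) (some (i + sz + 1)), st.2)], st.2 + 1)
        else st) (sl, (sl.length : Int))).1.map (·.1) : PySem.Set (List Int))) := by
  induction is with
  | nil => intro sl; simp only [List.foldl_nil]
  | cons i tl ih =>
      intro sl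
      simp only [List.foldl_cons]
      by_cases hmem : PySem.List.slice d (some i) (some (i + sz + 1)) ∈ sl.map (·.1)
      · -- already recorded: both loops skip
        have hB : PySem.Set.contains (sl.map (·.1))
            (PySem.List.slice d (some i) (some (i + sz + 1))) = true :=
          (PySem.Set.contains_iff _ _).mpr hmem
        have hA : pvIfNotIn sl (PySem.List.slice d (some i) (some (i + sz + 1))) = false := by
          rw [pvIfNotIn_eq, hB]; rfl
        rw [if_neg (by rw [hB, Bool.not_true, Bool.and_false]; exact Bool.false_ne_true),
            if_neg (by rw [hA, Bool.false_and]; exact Bool.false_ne_true)]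
        exact ih sl
      · have hB : PySem.Set.contains (sl.map (·.1))
            (PySem.List.slice d (some i) (some (i + sz + 1))) = false := by
          rw [← Bool.not_eq_true, PySem.Set.contains_iff]; exact hmem
        have hA : pvIfNotIn sl (PySem.List.slice d (some i) (some (i + sz + 1))) = true := by
          rw [pvIfNotIn_eq, hB]; rfl
        by_cases hc : (PySem.List.pyGetD d i 0 == 1) = true
        · -- both loops record the window
          have hcondB : (PySem.List.pyGetD d i 0 == 1
              && !(PySem.Set.contains (sl.map (·.1)) (PySem.List.slice d (some i) (some (i + sz + 1))))) = true := by
            rw [hc, hB]; rfl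
          have hcondA : (pvIfNotIn sl (PySem.List.slice d (some i) (some (i + sz + 1)))
              && (PySem.List.pyGetD d i 0 == 1)) = true := by
            rw [hA, hc]; rfl
          rw [if_pos hcondB, if_pos hcondA]
          have hadd : PySem.Set.add (sl.map (·.1)) (PySem.List.slice d (some i) (some (i + sz + 1)))
              = (sl ++ [(PySem.List.slice d (some i) (some (i + sz + 1)), (sl.length : Int))]).map (·.1) := by
            rw [pvSetAdd_not_mem _ _ hmem]; simp
          have hcnt : (sl.length : Int) + 1
              = ((sl ++ [(PySem.List.slice d (some i) (some (i + sz + 1)), (sl.length : Int))]).length : Int) := by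
            simp
          have hres : (if PySem.List.slice d (some i) (some (i + sz + 1)) == s
                then some ((sl.length : Int)) else pvFindSequence sl s)
              = pvFindSequence (sl ++ [(PySem.List.slice d (some i) (some (i + sz + 1)), (sl.length : Int))]) s := by
            rw [pvFindSequence_append]
            by_cases hws : (PySem.List.slice d (some i) (some (i + sz + 1)) == s) = true
            · have hseq : PySem.List.slice d (some i) (some (i + sz + 1)) = s := eq_of_beq hws
              rw [if_pos hws, pvFindSequence_none sl s (hseq ▸ hmem)]
              simp [pvFindSequence, hseq]
            · rw [if_neg hws]
              have hnone : pvFindSequence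
                  [(PySem.List.slice d (some i) (some (i + sz + 1)), (sl.length : Int))] s = none := by
                simp only [pvFindSequence]
                rw [if_neg]
                intro hb
                exact hws (by rw [eq_of_beq hb]; simp)
              rw [hnone, Option.or_none]
          rw [hres, hadd, hcnt]
          exact ih _
        · have hc' : (PySem.List.pyGetD d i 0 == 1) = false := by
            cases hq : (PySem.List.pyGetD d i 0 == 1) with
            | false => rfl
            | true => exact absurd hq hc
          rw [if_neg (by rw [hc', Bool.false_and]; exact Bool.false_ne_true),
              if_neg (by rw [hc', Bool.and_false]; exact Bool.false_ne_true)]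
          exact ih sl

-- pure list shape of one window of find_nk
lemma pvWindowRotNat (t : List Int) (j : Nat) (hj : j < t.length) :
    ((t ++ t).drop j).take (t.length + 1) = pvF (t.drop j ++ t.take j) := by
  have hne : (t.drop j).length = t.length - j := List.length_drop
  rw [List.drop_append_of_le_length (le_of_lt hj), List.take_append]
  have h1 : (t.drop j).take (t.length + 1) = t.drop j :=
    List.take_of_length_le (by omega)
  have h2 : t.length + 1 - (t.drop j).length = j + 1 := by omega
  rw [h1, h2]
  have h3 : (t.drop j).take 1 = [t[j]] := by
    rw [List.drop_eq_getElem_cons hj]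
    rfl
  have h4 : t.take (j + 1) = t.take j ++ [t[j]] := by
    rw [List.take_add_one]
    simp [List.getElem?_eq_getElem hj]
  rw [h4]
  unfold pvF
  rw [List.take_append_of_le_length (by omega), h3, List.append_assoc]

-- one window of the doubled list equals pvF of the corresponding rotation (slice form)
lemma pvWindowRot (t : List Int) (j : Nat) (hj : j < t.length) :
    PySem.List.slice (t ++ t) (some (j : Int)) (some ((j : Int) + ((t.length : Int) + 1))) =
    pvF (PySem.List.slice t (some (j : Int)) none ++ PySem.List.slice t none (some (j : Int))) := by
  rw [PySem.List.slice_toNat _ (by positivity) (by positivity),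
      PySem.List.slice_from _ (by positivity), PySem.List.slice_to _ (by positivity)]
  have h1 : ((j : Int) + ((t.length : Int) + 1)).toNat - ((j : Int)).toNat = t.length + 1 := by omega
  have h2 : ((j : Int)).toNat = j := by omega
  rw [h1, h2]
  exact pvWindowRotNat t j hj

-- decidability of the list order is unique: bridge between the elaborated instances
lemma pvDecEq : (fun (a b : List Int) => a.decidableLT b) =
    @LinearOrder.toDecidableLT (List Int) List.instLinearOrder :=
  funext fun _ => funext fun _ => Subsingleton.elim _ _

-- A's necklace (find_nk then slice) equals B's necklace (min over rotations)
lemma pvNecklaceEq (s : List Int) (h2 : 2 ≤ s.length) :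
    PySem.List.slice (pvFindNk s) none (some ((s.length : Int) - 1)) =
    (PySem.List.min? ((PySem.List.pyRange 0 ((s.length : Int) - 1) 1).map
        (fun i => PySem.List.slice (PySem.List.slice s none (some ((s.length : Int) - 1))) (some i) none ++
                  PySem.List.slice (PySem.List.slice s none (some ((s.length : Int) - 1))) none (some i)))
      (fun x => x)).getD [] := by
  obtain ⟨m, hm⟩ : ∃ m : Nat, s.length = m + 1 := ⟨s.length - 1, by omega⟩
  have hm1 : 1 ≤ m := by omega
  have hlen : ((s.length : Nat) : Int) = ((m : Int) + 1) := by rw [hm]; push_cast; ring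
  have hsz : ((s.length : Nat) : Int) - 1 = ((m : Nat) : Int) := by rw [hlen]; ring
  rw [hsz]
  -- the shared prefix t
  set t : List Int := PySem.List.slice s none (some ((m : Nat) : Int)) with ht
  have htlen : t.length = m := by
    rw [ht, PySem.List.slice_to _ (by positivity)]
    simp [hm]
  -- rotations
  set rotf : Int → List Int := fun i =>
    PySem.List.slice t (some i) none ++ PySem.List.slice t none (some i) with hrotf
  have hrotlen : ∀ y ∈ (PySem.List.pyRange 0 ((m : Nat) : Int) 1).map rotf, y.length = m := by
    intro y hy
    obtain ⟨i, hi, rfl⟩ := List.mem_map.mp hy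
    obtain ⟨hi0, him⟩ := PySem.List.mem_pyRange_one.mp hi
    rw [hrotf]
    simp only []
    rw [PySem.List.slice_from _ hi0, PySem.List.slice_to _ hi0]
    have : i.toNat ≤ m := by omega
    simp [htlen]
    omega
  -- nonemptiness
  have h0mem : (0 : Int) ∈ PySem.List.pyRange 0 ((m : Nat) : Int) 1 :=
    PySem.List.mem_pyRange_one.mpr ⟨le_refl 0, by exact_mod_cast hm1⟩
  -- B's minimum
  obtain ⟨rm, hrm⟩ : ∃ rm, PySem.List.min? ((PySem.List.pyRange 0 ((m : Nat) : Int) 1).map rotf)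
      (fun x => x) = some rm := by
    cases hq : PySem.List.min? ((PySem.List.pyRange 0 ((m : Nat) : Int) 1).map rotf) (fun x => x) with
    | none =>
        exfalso
        have := (PySem.List.min?_eq_none_iff _ _).mp hq
        rw [List.map_eq_nil_iff] at this
        rw [this] at h0mem
        exact (List.not_mem_nil).elim h0mem
    | some rm => exact ⟨rm, rfl⟩
  have hrmmem : rm ∈ (PySem.List.pyRange 0 ((m : Nat) : Int) 1).map rotf := PySem.List.min?_mem hrm
  have hrm' := hrm
  rw [pvDecEq] at hrm'
  have hrmmin : ∀ y ∈ (PySem.List.pyRange 0 ((m : Nat) : Int) 1).map rotf, rm ≤ y :=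
    fun y hy => PySem.List.min?_isMin (key := fun x => x) hrm' y hy
  have hrmlen : rm.length = m := hrotlen rm hrmmem
  -- A's states list is the dedup of windows = pvF of rotations
  simp only [pvFindNk, PySem.List.len_eq]
  rw [hsz, hlen, ← ht]
  have hfold : (PySem.List.pyRange 0 ((m : Nat) : Int) 1).foldl
      (fun states i =>
        if states.contains (PySem.List.slice (t ++ t) (some i) (some (i + ((m : Int) + 1)))) then states
        else states ++ [PySem.List.slice (t ++ t) (some i) (some (i + ((m : Int) + 1)))]) [] =
      PySem.Set.ofList (((PySem.List.pyRange 0 ((m : Nat) : Int) 1).map rotf).map pvF) := by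
    rw [show (fun (states : List (List Int)) i =>
        if states.contains (PySem.List.slice (t ++ t) (some i) (some (i + ((m : Int) + 1)))) then states
        else states ++ [PySem.List.slice (t ++ t) (some i) (some (i + ((m : Int) + 1)))]) =
      (fun (states : PySem.Set (List Int)) i =>
        PySem.Set.add states (PySem.List.slice (t ++ t) (some i) (some (i + ((m : Int) + 1))))) from rfl]
    rw [← PySem.Set.update_map_eq_foldl_add, PySem.Set.update_nil_left, List.map_map]
    congr 1
    apply List.map_congr_left
    intro i hi
    obtain ⟨hi0, him⟩ := PySem.List.mem_pyRange_one.mp hi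
    have hij : i = ((i.toNat : Nat) : Int) := by omega
    have hjm : i.toNat < t.length := by omega
    rw [hij]
    have hwr := pvWindowRot t i.toNat hjm
    rw [htlen] at hwr
    rw [hwr]
    rfl
  rw [hfold]
  -- the sorted head is pvF rm
  have hFrm_mem : pvF rm ∈ PySem.Set.ofList (((PySem.List.pyRange 0 ((m : Nat) : Int) 1).map rotf).map pvF) :=
    (PySem.Set.mem_ofList _ _).mpr (List.mem_map_of_mem hrmmem)
  cases hs : PySem.List.sorted
      (PySem.Set.ofList (((PySem.List.pyRange 0 ((m : Nat) : Int) 1).map rotf).map pvF))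
      (fun x => x) false with
  | nil =>
      exfalso
      rw [PySem.List.sorted_eq_nil_iff] at hs
      rw [hs] at hFrm_mem
      exact (List.not_mem_nil).elim hFrm_mem
  | cons h tl =>
      have hhead_mem : h ∈ ((PySem.List.pyRange 0 ((m : Nat) : Int) 1).map rotf).map pvF := by
        have hmem' : h ∈ PySem.List.sorted
            (PySem.Set.ofList (((PySem.List.pyRange 0 ((m : Nat) : Int) 1).map rotf).map pvF))
            (fun x => x) false := by rw [hs]; exact List.mem_cons_self
        exact (PySem.Set.mem_ofList _ _).mp ((PySem.List.mem_sorted _ _ _ _).mp hmem')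
      obtain ⟨r, hr, hfr⟩ := List.mem_map.mp hhead_mem
      have hs' := hs
      rw [pvDecEq] at hs'
      have hle : h ≤ pvF rm := PySem.List.key_head_sorted_le _ (fun x => x) hs' _ hFrm_mem
      have hge : pvF rm ≤ h := by
        rw [← hfr]
        exact pvFMono rm r (by rw [hrmlen, hrotlen r hr]) (hrmmin r hr)
      have hh : h = pvF rm := le_antisymm hle hge
      rw [PySem.List.pyGetD_zero_cons, hh, hrm]
      show PySem.List.slice (pvF rm) none (some ((m : Nat) : Int)) = rm
      rw [PySem.List.slice_to _ (by positivity), Int.toNat_natCast]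
      unfold pvF
      exact List.take_left' hrmlen

-- the running-best loop over rotations computes the minimum of the rotation list
lemma pvMinFold (s : List Int) (m : Nat) (hm1 : 1 ≤ m) :
    (PySem.List.pyRange 1 ((m : Nat) : Int) 1).foldl
      (fun best i =>
        let c := PySem.List.slice (PySem.List.slice s none (some ((m : Nat) : Int))) (some i) none ++
                 PySem.List.slice (PySem.List.slice s none (some ((m : Nat) : Int))) none (some i)
        if c < best then c else best) (PySem.List.slice s none (some ((m : Nat) : Int)))
    = (PySem.List.min? ((PySem.List.pyRange 0 ((m : Nat) : Int) 1).map
        (fun i => PySem.List.slice (PySem.List.slice s none (some ((m : Nat) : Int))) (some i) none ++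
                  PySem.List.slice (PySem.List.slice s none (some ((m : Nat) : Int))) none (some i)))
      (fun x => x)).getD [] := by
  have hrot0 : PySem.List.slice (PySem.List.slice s none (some ((m : Nat) : Int))) (some (0 : Int)) none ++
      PySem.List.slice (PySem.List.slice s none (some ((m : Nat) : Int))) none (some (0 : Int)) =
      PySem.List.slice s none (some ((m : Nat) : Int)) := by
    rw [PySem.List.slice_from _ le_rfl, PySem.List.slice_to _ le_rfl]
    simp
  rw [PySem.List.pyRange_one_cons (show (0 : Int) < ((m : Nat) : Int) by exact_mod_cast hm1),
      List.map_cons, pvDecEq, PySem.List.min?_id_cons, Option.getD_some, List.foldl_map, hrot0,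
      show (0 : Int) + 1 = 1 from rfl]
  congr 1
  funext b i
  simp only []
  by_cases h : (PySem.List.slice (PySem.List.slice s none (some ((m : Nat) : Int))) (some i) none ++
      PySem.List.slice (PySem.List.slice s none (some ((m : Nat) : Int))) none (some i)) < b
  · rw [if_pos h, min_eq_right (le_of_lt h)]
  · rw [if_neg h, min_eq_left (not_lt.mp h)]

-- length of B's necklace
lemma pvNeckLen (s : List Int) (m : Nat) (hm : s.length = m + 1) (hm1 : 1 ≤ m) :
    ((PySem.List.min? ((PySem.List.pyRange 0 ((m : Nat) : Int) 1).map
        (fun i => PySem.List.slice (PySem.List.slice s none (some ((m : Nat) : Int))) (some i) none ++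
                  PySem.List.slice (PySem.List.slice s none (some ((m : Nat) : Int))) none (some i)))
      (fun x => x)).getD []).length = m := by
  set t : List Int := PySem.List.slice s none (some ((m : Nat) : Int)) with ht
  have htlen : t.length = m := by
    rw [ht, PySem.List.slice_to _ (by positivity)]
    simp [hm]
  set rotf : Int → List Int := fun i =>
    PySem.List.slice t (some i) none ++ PySem.List.slice t none (some i) with hrotf
  have hrotlen : ∀ y ∈ (PySem.List.pyRange 0 ((m : Nat) : Int) 1).map rotf, y.length = m := by
    intro y hy
    obtain ⟨i, hi, rfl⟩ := List.mem_map.mp hy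
    obtain ⟨hi0, him⟩ := PySem.List.mem_pyRange_one.mp hi
    rw [hrotf]
    simp only []
    rw [PySem.List.slice_from _ hi0, PySem.List.slice_to _ hi0]
    have : i.toNat ≤ m := by omega
    simp [htlen]
    omega
  have h0mem : (0 : Int) ∈ PySem.List.pyRange 0 ((m : Nat) : Int) 1 :=
    PySem.List.mem_pyRange_one.mpr ⟨le_refl 0, by exact_mod_cast hm1⟩
  cases hq : PySem.List.min? ((PySem.List.pyRange 0 ((m : Nat) : Int) 1).map rotf) (fun x => x) with
  | none =>
      exfalso
      have := (PySem.List.min?_eq_none_iff _ _).mp hq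
      rw [List.map_eq_nil_iff] at this
      rw [this] at h0mem
      exact (List.not_mem_nil).elim h0mem
  | some rm =>
      simp only [Option.getD_some]
      exact hrotlen rm (PySem.List.min?_mem hq)

-- rotation in slice form is List.rotate
lemma pvRotSlice (l : List Int) (d : Int) (h0 : 0 ≤ d) (hd : d.toNat ≤ l.length) :
    PySem.List.slice l (some d) none ++ PySem.List.slice l none (some d) = l.rotate d.toNat := by
  rw [PySem.List.slice_from _ h0, PySem.List.slice_to _ h0,
      List.rotate_eq_drop_append_take hd]

-- find? over an increasing Int range: the first hit, and nothing before it
lemma pvFindFirst (pred : Int → Bool) : ∀ (k : Nat) (a b : Int), (b - a).toNat = k →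
    ((∀ d, (PySem.List.pyRange a b 1).find? pred = some d →
        pred d = true ∧ a ≤ d ∧ d < b ∧ ∀ e, a ≤ e → e < d → pred e = false)
     ∧ ((PySem.List.pyRange a b 1).find? pred = none → ∀ e, a ≤ e → e < b → pred e = false)) := by
  intro k
  induction k with
  | zero =>
      intro a b hk
      rw [PySem.List.pyRange_one_eq_nil (by omega)]
      constructor
      · intro d hd; simp at hd
      · intro _ e he1 he2; omega
  | succ k ih =>
      intro a b hk
      rw [PySem.List.pyRange_one_cons (by omega)]
      have hrec := ih (a + 1) b (by omega)
      by_cases hp : pred a = true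
      · constructor
        · intro d hd
          simp only [List.find?_cons, hp] at hd
          cases hd
          exact ⟨hp, le_refl a, by omega, fun e he1 he2 => by omega⟩
        · intro hn
          simp only [List.find?_cons, hp] at hn
          exact (Option.some_ne_none a hn).elim
      · have hp' : pred a = false := by
          cases hq : pred a with
          | false => rfl
          | true => exact absurd hq hp
        constructor
        · intro d hd
          simp only [List.find?_cons, hp'] at hd
          obtain ⟨h1, h2, h3, h4⟩ := hrec.1 d hd
          refine ⟨h1, by omega, h3, ?_⟩
          intro e he1 he2
          by_cases hea : e = a
          · rw [hea]; exact hp'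
          · exact h4 e (by omega) he2
        · intro hn
          simp only [List.find?_cons, hp'] at hn
          intro e he1 he2
          by_cases hea : e = a
          · rw [hea]; exact hp'
          · exact hrec.2 hn e (by omega) he2

-- splitting a countdown range
lemma pvRangeSplitNeg (a m b : Int) (h1 : b ≤ m) (h2 : m ≤ a) :
    PySem.List.pyRange a b (-1) = PySem.List.pyRange a m (-1) ++ PySem.List.pyRange m b (-1) := by
  rw [PySem.List.pyRange_neg_one_eq_reverse, PySem.List.pyRange_neg_one_eq_reverse,
      PySem.List.pyRange_neg_one_eq_reverse,
      PySem.List.pyRange_one_append (b + 1) (m + 1) (a + 1) (by omega) (by omega),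
      List.reverse_append]

-- over indices with pairwise-distinct, unseen windows, the set loop is B's set-free loop
lemma pvFreshSim (d neck s : List Int) (sz : Int) :
    ∀ (is : List Int) (r : Option Int) (c : Int) (seen : PySem.Set (List Int)),
    (∀ i ∈ is, PySem.List.slice d (some i) (some (i + sz + 1)) =
        (PySem.List.slice neck (some i) none ++ PySem.List.slice neck none (some i)) ++
        PySem.List.slice (PySem.List.slice neck (some i) none ++ PySem.List.slice neck none (some i)) none (some 1)
      ∧ PySem.List.pyGetD d i 0 = PySem.List.pyGetD neck i 0) →
    is.Pairwise (fun i j => PySem.List.slice d (some i) (some (i + sz + 1)) ≠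
        PySem.List.slice d (some j) (some (j + sz + 1))) →
    (∀ i ∈ is, PySem.List.slice d (some i) (some (i + sz + 1)) ∉ seen) →
    is.foldl
      (fun st i =>
        if (PySem.List.pyGetD d i 0 == 1)
            && !(PySem.Set.contains st.2.2 (PySem.List.slice d (some i) (some (i + sz + 1)))) then
          (if PySem.List.slice d (some i) (some (i + sz + 1)) == s then some st.2.1 else st.1,
           st.2.1 + 1, PySem.Set.add st.2.2 (PySem.List.slice d (some i) (some (i + sz + 1))))
        else st) (r, c, seen)
    = ((is.foldl
        (fun st i =>
          if PySem.List.pyGetD neck i 0 == 1 then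
            let w := PySem.List.slice neck (some i) none ++ PySem.List.slice neck none (some i)
            (if w ++ PySem.List.slice w none (some 1) == s then some st.2 else st.1, st.2 + 1)
          else st) (r, c)).1,
       (is.foldl
        (fun st i =>
          if PySem.List.pyGetD neck i 0 == 1 then
            let w := PySem.List.slice neck (some i) none ++ PySem.List.slice neck none (some i)
            (if w ++ PySem.List.slice w none (some 1) == s then some st.2 else st.1, st.2 + 1)
          else st) (r, c)).2,
       seen ++ (is.filter (fun i => PySem.List.pyGetD d i 0 == 1)).map
         (fun i => PySem.List.slice d (some i) (some (i + sz + 1)))) := by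
  intro is
  induction is with
  | nil => intro r c seen _ _ _; simp
  | cons i tl ih =>
      intro r c seen hww hpair hseen
      have hwwi := hww i List.mem_cons_self
      have hseeni := hseen i List.mem_cons_self
      simp only [List.foldl_cons, List.filter_cons]
      by_cases hc : (PySem.List.pyGetD d i 0 == 1) = true
      · have hcN : (PySem.List.pyGetD neck i 0 == 1) = true := by rw [← hwwi.2]; exact hc
        have hcontains : PySem.Set.contains seen
            (PySem.List.slice d (some i) (some (i + sz + 1))) = false := by
          rw [← Bool.not_eq_true, PySem.Set.contains_iff]; exact hseeni
        rw [if_pos (by rw [hc, hcontains]; rfl), if_pos hcN, hc]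
        have hwcmp : (PySem.List.slice d (some i) (some (i + sz + 1)) == s)
            = ((PySem.List.slice neck (some i) none ++ PySem.List.slice neck none (some i)) ++
               PySem.List.slice (PySem.List.slice neck (some i) none ++ PySem.List.slice neck none (some i)) none (some 1) == s) := by
          rw [hwwi.1]
        have hadd : PySem.Set.add seen (PySem.List.slice d (some i) (some (i + sz + 1)))
            = seen ++ [PySem.List.slice d (some i) (some (i + sz + 1))] :=
          pvSetAdd_not_mem _ _ hseeni
        rw [hwcmp, hadd]
        have hrec := ih (if ((PySem.List.slice neck (some i) none ++ PySem.List.slice neck none (some i)) ++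
               PySem.List.slice (PySem.List.slice neck (some i) none ++ PySem.List.slice neck none (some i)) none (some 1) == s)
              then some c else r) (c + 1)
            (seen ++ [PySem.List.slice d (some i) (some (i + sz + 1))])
            (fun j hj => hww j (List.mem_cons_of_mem _ hj))
            hpair.of_cons
            (fun j hj => by
              intro hjmem
              rcases List.mem_append.mp hjmem with h | h
              · exact hseen j (List.mem_cons_of_mem _ hj) h
              · have : PySem.List.slice d (some j) (some (j + sz + 1))
                    = PySem.List.slice d (some i) (some (i + sz + 1)) := by simpa using h
                exact (List.rel_of_pairwise_cons hpair hj) this.symm)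
        rw [hrec]
        simp
      · have hc' : (PySem.List.pyGetD d i 0 == 1) = false := by
          cases hq : (PySem.List.pyGetD d i 0 == 1) with
          | false => rfl
          | true => exact absurd hq hc
        have hcN : (PySem.List.pyGetD neck i 0 == 1) = false := by rw [← hwwi.2]; exact hc'
        rw [if_neg (by rw [hc', Bool.false_and]; exact Bool.false_ne_true),
            if_neg (by rw [hcN]; exact Bool.false_ne_true), hc']
        exact ih r c seen (fun j hj => hww j (List.mem_cons_of_mem _ hj)) hpair.of_cons
          (fun j hj => hseen j (List.mem_cons_of_mem _ hj))

-- indices whose window is already in the set leave the set loop unchanged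
lemma pvStaleSkip (d s : List Int) (sz : Int) :
    ∀ (is : List Int) (st : Option Int × Int × PySem.Set (List Int)),
    (∀ i ∈ is, (PySem.List.pyGetD d i 0 == 1) = true →
        PySem.List.slice d (some i) (some (i + sz + 1)) ∈ st.2.2) →
    is.foldl
      (fun st i =>
        if (PySem.List.pyGetD d i 0 == 1)
            && !(PySem.Set.contains st.2.2 (PySem.List.slice d (some i) (some (i + sz + 1)))) then
          (if PySem.List.slice d (some i) (some (i + sz + 1)) == s then some st.2.1 else st.1,
           st.2.1 + 1, PySem.Set.add st.2.2 (PySem.List.slice d (some i) (some (i + sz + 1))))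
        else st) st = st := by
  intro is
  induction is with
  | nil => intro st _; rfl
  | cons i tl ih =>
      intro st hm
      simp only [List.foldl_cons]
      have hskip : ((PySem.List.pyGetD d i 0 == 1)
          && !(PySem.Set.contains st.2.2 (PySem.List.slice d (some i) (some (i + sz + 1))))) = false := by
        by_cases hc : (PySem.List.pyGetD d i 0 == 1) = true
        · have : PySem.Set.contains st.2.2 (PySem.List.slice d (some i) (some (i + sz + 1))) = true :=
            (PySem.Set.contains_iff _ _).mpr (hm i List.mem_cons_self hc)
          rw [hc, this]; rfl
        · have hc' : (PySem.List.pyGetD d i 0 == 1) = false := by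
            cases hq : (PySem.List.pyGetD d i 0 == 1) with
            | false => rfl
            | true => exact absurd hq hc
          rw [hc', Bool.false_and]
      rw [if_neg (by rw [hskip]; exact Bool.false_ne_true)]
      exact ih st (fun j hj => hm j (List.mem_cons_of_mem _ hj))

-- rotations within one minimal period are pairwise distinct
lemma pvRotDistinct (neck : List Int) (P a b : Nat) (ha : a < neck.length) (_hb : b < neck.length)
    (hba : b < a) (hab : a - b < P)
    (hmin : ∀ e : Nat, 1 ≤ e → e < P → neck.rotate e ≠ neck) :
    neck.rotate a ≠ neck.rotate b := by
  intro h
  have hq : neck.rotate (b + (neck.length - a)) = neck := by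
    calc neck.rotate (b + (neck.length - a))
        = (neck.rotate b).rotate (neck.length - a) := (List.rotate_rotate _ _ _).symm
      _ = (neck.rotate a).rotate (neck.length - a) := by rw [h]
      _ = neck := by
          rw [List.rotate_rotate, show a + (neck.length - a) = neck.length by omega,
              List.rotate_length]
  have habn : neck.rotate (a - b) = neck := by
    have h' := congrArg (fun l => List.rotate l (a - b)) hq.symm
    simp only [List.rotate_rotate] at h'
    rw [show b + (neck.length - a) + (a - b) = neck.length by omega, List.rotate_length] at h'
    exact h'
  exact hmin (a - b) (by omega) hab habn

-- ===== VERDICT (by name: the statement is the Claim_ definition above) =====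
theorem shift_order_for_1_spec : Claim_equal_shift_order_for_1 := by
  intro s _ hpre
  have h2 : 2 ≤ s.length := hpre
  unfold Spec_shift_order_for_1
  obtain ⟨m, hm⟩ : ∃ m : Nat, s.length = m + 1 := ⟨s.length - 1, by omega⟩
  have hm1 : 1 ≤ m := by omega
  have hsz : ((s.length : Nat) : Int) - 1 = ((m : Nat) : Int) := by rw [hm]; push_cast; ring
  simp only [shift_order_for_1, shift_order_for_1_alt, PySem.List.len_eq]
  rw [pvNecklaceEq s h2]
  simp only [hsz]
  rw [← pvMinFold s m hm1]
  set neck : List Int :=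
    (PySem.List.pyRange 1 ((m : Nat) : Int) 1).foldl
      (fun best i =>
        let c := PySem.List.slice (PySem.List.slice s none (some ((m : Nat) : Int))) (some i) none ++
                 PySem.List.slice (PySem.List.slice s none (some ((m : Nat) : Int))) none (some i)
        if c < best then c else best) (PySem.List.slice s none (some ((m : Nat) : Int))) with hneck
  have hnecklen : neck.length = m := by
    rw [hneck, pvMinFold s m hm1]; exact pvNeckLen s m hm hm1
  -- characterize B's p
  set pInt : Int :=
    ((PySem.List.pyRange 1 ((m : Nat) : Int) 1).find?
      (fun d => PySem.List.slice neck (some d) none ++ PySem.List.slice neck none (some d)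
                  == neck)).getD ((m : Nat) : Int) with hpdef
  have hpredRot : ∀ e : Int, 0 ≤ e → e ≤ (m : Int) →
      (((PySem.List.slice neck (some e) none ++ PySem.List.slice neck none (some e)) == neck) = true
        ↔ neck.rotate e.toNat = neck) := by
    intro e he0 hem
    rw [pvRotSlice neck e he0 (by omega), beq_iff_eq]
  have hp1 : 1 ≤ pInt ∧ pInt ≤ (m : Int) ∧ neck.rotate pInt.toNat = neck ∧
      (∀ e : Int, 1 ≤ e → e < pInt → ¬ (neck.rotate e.toNat = neck)) := by
    have hff := pvFindFirst
      (fun d => PySem.List.slice neck (some d) none ++ PySem.List.slice neck none (some d) == neck)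
      (((m : Int) - 1)).toNat 1 ((m : Nat) : Int) rfl
    cases hfq : (PySem.List.pyRange 1 ((m : Nat) : Int) 1).find?
        (fun d => PySem.List.slice neck (some d) none ++ PySem.List.slice neck none (some d) == neck) with
    | some d =>
        obtain ⟨hd1, hd2, hd3, hd4⟩ := hff.1 d hfq
        have hpd : pInt = d := by rw [hpdef, hfq]; rfl
        refine ⟨by omega, by omega, ?_, ?_⟩
        · rw [hpd]; exact (hpredRot d (by omega) (by omega)).mp hd1
        · intro e he1 he2 hrot
          rw [hpd] at he2
          have := hd4 e he1 he2
          rw [← Bool.not_eq_true] at this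
          exact this ((hpredRot e (by omega) (by omega)).mpr hrot)
    | none =>
        have hpd : pInt = (m : Int) := by rw [hpdef, hfq]; rfl
        refine ⟨by omega, by omega, ?_, ?_⟩
        · rw [hpd, Int.toNat_natCast, ← hnecklen, List.rotate_length]
        · intro e he1 he2 hrot
          rw [hpd] at he2
          have := hff.2 hfq e he1 he2
          rw [← Bool.not_eq_true] at this
          exact this ((hpredRot e (by omega) (by omega)).mpr hrot)
  obtain ⟨hp1', hpm, hPp, hmin⟩ := hp1
  set P : Nat := pInt.toNat with hPdef
  have hP1 : 1 ≤ P := by omega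
  have hPm : P ≤ m := by omega
  have hProt : neck.rotate P = neck := hPp
  have hminN : ∀ e : Nat, 1 ≤ e → e < P → neck.rotate e ≠ neck := by
    intro e he1 he2
    have := hmin (e : Int) (by omega) (by omega)
    rwa [Int.toNat_natCast] at this
  -- window identities
  have hwin : ∀ j : Nat, j < m →
      PySem.List.slice (neck ++ neck) (some (j : Int)) (some ((j : Int) + (m : Int) + 1)) =
      pvF (neck.rotate j) := by
    intro j hj
    have h := pvWindowRot neck j (by omega)
    rw [hnecklen] at h
    rw [show (j : Int) + (m : Int) + 1 = (j : Int) + ((m : Int) + 1) by ring, h,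
        pvRotSlice neck (j : Int) (by positivity) (by simp [hnecklen]; omega), Int.toNat_natCast]
  have hget : ∀ j : Nat, j < m →
      PySem.List.pyGetD (neck ++ neck) (j : Int) 0 = neck.getD j 0 := by
    intro j hj
    rw [PySem.List.pyGetD_natCast, List.getD_eq_getElem?_getD, List.getD_eq_getElem?_getD,
        List.getElem?_append_left (by omega)]
  have hgetper : ∀ j : Nat, j + P < m → neck.getD j 0 = neck.getD (j + P) 0 := by
    intro j hj
    have hj1 : j < neck.length := by omega
    have hj2 : j + P < neck.length := by omega
    have hj3 : j < (neck.rotate P).length := by rw [List.length_rotate]; omega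
    rw [List.getD_eq_getElem _ _ hj1, List.getD_eq_getElem _ _ hj2,
        List.getElem_of_eq hProt.symm hj1, List.getElem_rotate]
    congr 1
    rw [hnecklen, Nat.mod_eq_of_lt (by omega)]
  have hrotper : ∀ j : Nat, j + P < m → neck.rotate j = neck.rotate (j + P) := by
    intro j hj
    conv_lhs => rw [← hProt]
    rw [List.rotate_rotate, Nat.add_comm]
  -- the set-based loop equals A's loop (pvLoopSim with empty start)
  have hsim := pvLoopSim (neck ++ neck) s ((m : Nat) : Int)
    (PySem.List.pyRange ((m : Int) - 1) (-1) (-1)) []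
  simp only [List.length_nil, Nat.cast_zero, List.map_nil, pvFindSequence] at hsim
  -- split the countdown
  have hsplit : PySem.List.pyRange ((m : Int) - 1) (-1) (-1) =
      PySem.List.pyRange ((m : Int) - 1) ((m : Int) - pInt - 1) (-1) ++
      PySem.List.pyRange ((m : Int) - pInt - 1) (-1) (-1) :=
    pvRangeSplitNeg _ _ _ (by omega) (by omega)
  -- fresh segment: the set loop is B's loop
  have hww : ∀ i ∈ PySem.List.pyRange ((m : Int) - 1) ((m : Int) - pInt - 1) (-1),
      PySem.List.slice (neck ++ neck) (some i) (some (i + ((m : Nat) : Int) + 1)) =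
        (PySem.List.slice neck (some i) none ++ PySem.List.slice neck none (some i)) ++
        PySem.List.slice (PySem.List.slice neck (some i) none ++ PySem.List.slice neck none (some i)) none (some 1)
      ∧ PySem.List.pyGetD (neck ++ neck) i 0 = PySem.List.pyGetD neck i 0 := by
    intro i hi
    obtain ⟨hlo, hhi⟩ := PySem.List.mem_pyRange_neg_one.mp hi
    have hi0 : 0 ≤ i := by omega
    set j : Nat := i.toNat with hjdef
    have hij : i = (j : Int) := by omega
    have hj : j < m := by omega
    have hr : PySem.List.slice neck (some ((j : Nat) : Int)) none ++
        PySem.List.slice neck none (some ((j : Nat) : Int)) = neck.rotate j := by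
      rw [pvRotSlice neck _ (by positivity) (by rw [Int.toNat_natCast, hnecklen]; omega),
          Int.toNat_natCast]
    constructor
    · rw [hij, hwin j hj, hr, PySem.List.slice_to _ (by norm_num)]
      rfl
    · rw [hij, hget j hj, PySem.List.pyGetD_natCast]
  have hpair : (PySem.List.pyRange ((m : Int) - 1) ((m : Int) - pInt - 1) (-1)).Pairwise
      (fun i j => PySem.List.slice (neck ++ neck) (some i) (some (i + ((m : Nat) : Int) + 1)) ≠
        PySem.List.slice (neck ++ neck) (some j) (some (j + ((m : Nat) : Int) + 1))) := by
    have hgt : (PySem.List.pyRange ((m : Int) - 1) ((m : Int) - pInt - 1) (-1)).Pairwise (· > ·) := by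
      rw [PySem.List.pyRange_neg_one_eq_reverse]
      exact List.pairwise_reverse.mpr (PySem.List.pairwise_lt_pyRange_one _ _)
    refine List.Pairwise.imp_of_mem ?_ hgt
    intro a b ha hb hab
    obtain ⟨ha1, ha2⟩ := PySem.List.mem_pyRange_neg_one.mp ha
    obtain ⟨hb1, hb2⟩ := PySem.List.mem_pyRange_neg_one.mp hb
    have hax : a = ((a.toNat : Nat) : Int) := by omega
    have hbx : b = ((b.toNat : Nat) : Int) := by omega
    rw [hax, hbx, hwin a.toNat (by omega), hwin b.toNat (by omega)]
    intro heq
    have hreq : neck.rotate a.toNat = neck.rotate b.toNat :=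
      pvFInj _ _ (by rw [List.length_rotate, List.length_rotate]) heq
    exact pvRotDistinct neck P a.toNat b.toNat (by rw [hnecklen]; omega) (by rw [hnecklen]; omega)
      (by omega) (by omega) hminN hreq
  have hfresh := pvFreshSim (neck ++ neck) neck s ((m : Nat) : Int)
    (PySem.List.pyRange ((m : Int) - 1) ((m : Int) - pInt - 1) (-1)) none 0 [] hww hpair
    (by intro i _; exact List.not_mem_nil)
  rw [List.nil_append] at hfresh
  -- stale segment: everything is already in the set
  have hmemtail : ∀ i ∈ PySem.List.pyRange ((m : Int) - pInt - 1) (-1) (-1),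
      (PySem.List.pyGetD (neck ++ neck) i 0 == 1) = true →
      PySem.List.slice (neck ++ neck) (some i) (some (i + ((m : Nat) : Int) + 1)) ∈
        (((PySem.List.pyRange ((m : Int) - 1) ((m : Int) - pInt - 1) (-1)).filter
            (fun i => PySem.List.pyGetD (neck ++ neck) i 0 == 1)).map
          (fun i => PySem.List.slice (neck ++ neck) (some i) (some (i + ((m : Nat) : Int) + 1)))) := by
    have hPI : pInt = ((P : Nat) : Int) := by omega
    have key : ∀ k : Nat, ∀ j : Nat, j < m → m - j ≤ k →
        (PySem.List.pyGetD (neck ++ neck) ((j : Nat) : Int) 0 == 1) = true →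
        PySem.List.slice (neck ++ neck) (some ((j : Nat) : Int))
            (some (((j : Nat) : Int) + ((m : Nat) : Int) + 1)) ∈
          (((PySem.List.pyRange ((m : Int) - 1) ((m : Int) - pInt - 1) (-1)).filter
              (fun i => PySem.List.pyGetD (neck ++ neck) i 0 == 1)).map
            (fun i => PySem.List.slice (neck ++ neck) (some i) (some (i + ((m : Nat) : Int) + 1)))) := by
      intro k
      induction k with
      | zero => intro j hj hk _; omega
      | succ k ih =>
          intro j hj hk hcond
          by_cases hfj : m - P ≤ j
          · refine List.mem_map.mpr ⟨((j : Nat) : Int), ?_, rfl⟩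
            refine List.mem_filter.mpr ⟨?_, hcond⟩
            exact PySem.List.mem_pyRange_neg_one.mpr ⟨by omega, by omega⟩
          · have hjP : j + P < m := by omega
            have hcond' : (PySem.List.pyGetD (neck ++ neck) ((j + P : Nat) : Int) 0 == 1) = true := by
              rw [hget (j + P) hjP, ← hgetper j hjP, ← hget j hj]
              exact hcond
            have hwper : PySem.List.slice (neck ++ neck) (some ((j : Nat) : Int))
                (some (((j : Nat) : Int) + ((m : Nat) : Int) + 1)) =
                PySem.List.slice (neck ++ neck) (some ((j + P : Nat) : Int))
                (some (((j + P : Nat) : Int) + ((m : Nat) : Int) + 1)) := by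
              rw [hwin j hj, hwin (j + P) hjP, hrotper j hjP]
            rw [hwper]
            exact ih (j + P) hjP (by omega) hcond'
    intro i hi hcond
    obtain ⟨hlo, hhi⟩ := PySem.List.mem_pyRange_neg_one.mp hi
    have hij : i = ((i.toNat : Nat) : Int) := by omega
    have hj : i.toNat < m := by omega
    rw [hij] at hcond ⊢
    exact key m i.toNat hj (by omega) hcond
  have hstale := pvStaleSkip (neck ++ neck) s ((m : Nat) : Int)
    (PySem.List.pyRange ((m : Int) - pInt - 1) (-1) (-1))
    (((PySem.List.pyRange ((m : Int) - 1) ((m : Int) - pInt - 1) (-1)).foldl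
        (fun st i =>
          if PySem.List.pyGetD neck i 0 == 1 then
            let w := PySem.List.slice neck (some i) none ++ PySem.List.slice neck none (some i)
            (if w ++ PySem.List.slice w none (some 1) == s then some st.2 else st.1, st.2 + 1)
          else st) ((none : Option Int), (0 : Int))).1,
     ((PySem.List.pyRange ((m : Int) - 1) ((m : Int) - pInt - 1) (-1)).foldl
        (fun st i =>
          if PySem.List.pyGetD neck i 0 == 1 then
            let w := PySem.List.slice neck (some i) none ++ PySem.List.slice neck none (some i)
            (if w ++ PySem.List.slice w none (some 1) == s then some st.2 else st.1, st.2 + 1)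
          else st) ((none : Option Int), (0 : Int))).2,
     (((PySem.List.pyRange ((m : Int) - 1) ((m : Int) - pInt - 1) (-1)).filter
         (fun i => PySem.List.pyGetD (neck ++ neck) i 0 == 1)).map
       (fun i => PySem.List.slice (neck ++ neck) (some i) (some (i + ((m : Nat) : Int) + 1)))))
    hmemtail
  have hchain : (PySem.List.pyRange ((m : Int) - 1) (-1) (-1)).foldl
      (fun (st : Option Int × Int × PySem.Set (List Int)) i =>
        if (PySem.List.pyGetD (neck ++ neck) i 0 == 1)
            && !(PySem.Set.contains st.2.2
                  (PySem.List.slice (neck ++ neck) (some i) (some (i + ((m : Nat) : Int) + 1)))) then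
          (if PySem.List.slice (neck ++ neck) (some i) (some (i + ((m : Nat) : Int) + 1)) == s
              then some st.2.1 else st.1,
           st.2.1 + 1,
           PySem.Set.add st.2.2
             (PySem.List.slice (neck ++ neck) (some i) (some (i + ((m : Nat) : Int) + 1))))
        else st) ((none : Option Int), (0 : Int), ([] : PySem.Set (List Int)))
      = (((PySem.List.pyRange ((m : Int) - 1) ((m : Int) - pInt - 1) (-1)).foldl
        (fun st i =>
          if PySem.List.pyGetD neck i 0 == 1 then
            let w := PySem.List.slice neck (some i) none ++ PySem.List.slice neck none (some i)
            (if w ++ PySem.List.slice w none (some 1) == s then some st.2 else st.1, st.2 + 1)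
          else st) ((none : Option Int), (0 : Int))).1,
     ((PySem.List.pyRange ((m : Int) - 1) ((m : Int) - pInt - 1) (-1)).foldl
        (fun st i =>
          if PySem.List.pyGetD neck i 0 == 1 then
            let w := PySem.List.slice neck (some i) none ++ PySem.List.slice neck none (some i)
            (if w ++ PySem.List.slice w none (some 1) == s then some st.2 else st.1, st.2 + 1)
          else st) ((none : Option Int), (0 : Int))).2,
     (((PySem.List.pyRange ((m : Int) - 1) ((m : Int) - pInt - 1) (-1)).filter
         (fun i => PySem.List.pyGetD (neck ++ neck) i 0 == 1)).map
       (fun i => PySem.List.slice (neck ++ neck) (some i) (some (i + ((m : Nat) : Int) + 1))))) := by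
    rw [hsplit, List.foldl_append, hfresh]
    exact hstale
  have hout := hchain.symm.trans hsim
  exact (congrArg (fun p : Option Int × Int × PySem.Set (List Int) => (p.1, p.2.1)) hout).symm
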